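-- pv_equiv track=rewrite | github.com/yuyye/airway_labeling | dataset.py | reduce_classes
-- ===== SOURCE A (Python) =====
-- def reduce_classes(y0):
--     y = y0.copy()
--     for j in range(len(y)):
--         if y[j]<=3:
--             y[j] = 1
--         elif (y[j]>3)&(y[j]<=7):
--             y[j] = 2
--         elif (y[j]>7)&(y[j]<=10):
--             y[j] = 3
--         elif (y[j]>10)&(y[j]<=12):
--             y[j] = 4
--         elif (y[j]>12)&(y[j]<=17):
--             y[j] = 5
--         else:
--             y[j] = 0
--     return y
-- ===== SOURCE B (Python) =====
-- from bisect import bisect_left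
--
-- _BINS = [3, 7, 10, 12, 17]
-- _TABLE = [1, 2, 3, 4, 5, 0]
--
-- def reduce_classes(y0):
--     return [_TABLE[bisect_left(_BINS, v)] for v in y0]
-- ===== Notes on version B (the rewrite author's own statement) =====
-- stated objective: idiomatic
-- what changed: Replaces the explicit per-element if/elif cascade over indices with a bisect_left binary search into a bins array plus a lookup table, built as a list comprehension.
import Mathlib
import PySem

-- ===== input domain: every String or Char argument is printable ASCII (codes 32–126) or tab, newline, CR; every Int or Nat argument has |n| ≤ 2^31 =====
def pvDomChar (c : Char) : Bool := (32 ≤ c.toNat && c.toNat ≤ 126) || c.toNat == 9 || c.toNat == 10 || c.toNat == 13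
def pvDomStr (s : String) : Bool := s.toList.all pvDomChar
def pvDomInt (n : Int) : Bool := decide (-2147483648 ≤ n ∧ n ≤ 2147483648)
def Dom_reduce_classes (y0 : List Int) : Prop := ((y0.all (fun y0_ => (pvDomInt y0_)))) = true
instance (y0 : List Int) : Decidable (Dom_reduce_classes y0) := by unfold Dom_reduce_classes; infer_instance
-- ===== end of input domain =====

-- B replaces A's per-index if/elif cascade by a bisect-left bucket search plus lookup table (idiomatic; same cost).

-- ===== PORT A =====
-- A copies y0 and rewrites each position j in an index loop through an if/elif cascade.
def reduceStepA (y : List Int) (j : Nat) : List Int :=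
  let v := y.getD j 0
  y.set j
    (if v ≤ 3 then 1
     else if (3 < v) && (v ≤ 7) then 2
     else if (7 < v) && (v ≤ 10) then 3
     else if (10 < v) && (v ≤ 12) then 4
     else if (12 < v) && (v ≤ 17) then 5
     else 0)

def reduce_classes (y0 : List Int) : List Int :=
  (List.range y0.length).foldl reduceStepA y0

-- ===== PORT B =====
-- bisect.bisect_left on a sorted list: number of leading elements < v.
def bisectLeft (bins : List Int) (v : Int) : Nat :=
  (bins.takeWhile (fun b => decide (b < v))).length

def reduce_classes_alt (y0 : List Int) : List Int :=
  y0.map (fun v => ([1, 2, 3, 4, 5, 0] : List Int).getD (bisectLeft [3, 7, 10, 12, 17] v) 0)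

-- ===== PRECONDITION & SPEC =====
def Spec_reduce_classes (y0 : List Int) (out : List Int) : Prop := out = reduce_classes_alt y0
instance (y0 : List Int) (out : List Int) : Decidable (Spec_reduce_classes y0 out) := by unfold Spec_reduce_classes; infer_instance

-- ===== CLAIM (what is proved, stated in full; the proofs are below) =====
def Claim_equal_reduce_classes : Prop := ∀ (y0 : List Int), Dom_reduce_classes y0 → Spec_reduce_classes y0 (reduce_classes y0)

-- ===== LEMMAS AND PROOFS =====

def fB (v : Int) : Int :=
  ([1, 2, 3, 4, 5, 0] : List Int).getD (bisectLeft [3, 7, 10, 12, 17] v) 0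

theorem loop_eq : ∀ (suf pre : List Int),
    (List.range' pre.length suf.length).foldl reduceStepA (pre ++ suf)
      = pre ++ suf.map fB := by
  intro suf
  induction suf with
  | nil => intro pre; simp
  | cons v rest ih =>
    intro pre
    have hstep : reduceStepA (pre ++ v :: rest) pre.length
        = (pre ++ [fB v]) ++ rest := by
      have hget : (pre ++ v :: rest).getD pre.length 0 = v := by
        simp [List.getD]
      have hset : (pre ++ v :: rest).set pre.length (fB v) = (pre ++ [fB v]) ++ rest := by
        rw [List.set_append_right _ _ (le_refl _)]
        simp
      have hval :
          (if v ≤ 3 then (1 : Int)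
           else if (3 < v) && (v ≤ 7) then 2
           else if (7 < v) && (v ≤ 10) then 3
           else if (10 < v) && (v ≤ 12) then 4
           else if (12 < v) && (v ≤ 17) then 5
           else 0) = fB v := by
        simp only [fB, bisectLeft, List.takeWhile]
        by_cases h1 : v ≤ 3
        · simp [h1, show ¬(3 < v) by omega]
        · by_cases h2 : v ≤ 7
          · simp [h1, h2, show (3:Int) < v by omega, show ¬(7 < v) by omega]
          · by_cases h3 : v ≤ 10
            · simp [h1, h2, h3, show (3:Int) < v by omega, show (7:Int) < v by omega,
                show ¬(10 < v) by omega]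
            · by_cases h4 : v ≤ 12
              · simp [h1, h2, h3, h4, show (3:Int) < v by omega, show (7:Int) < v by omega,
                  show (10:Int) < v by omega, show ¬(12 < v) by omega]
              · by_cases h5 : v ≤ 17
                · simp [h1, h2, h3, h4, h5, show (3:Int) < v by omega, show (7:Int) < v by omega,
                    show (10:Int) < v by omega, show (12:Int) < v by omega, show ¬(17 < v) by omega]
                · simp [h1, h2, h3, h4, h5, show (3:Int) < v by omega, show (7:Int) < v by omega,
                    show (10:Int) < v by omega, show (12:Int) < v by omega, show (17:Int) < v by omega]
      simp only [reduceStepA, hget, hval, hset]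
    calc (List.range' pre.length (v :: rest).length).foldl reduceStepA (pre ++ v :: rest)
        = (List.range' ((pre ++ [fB v]).length) rest.length).foldl reduceStepA
            ((pre ++ [fB v]) ++ rest) := by
          simp [List.range'_succ, hstep]
      _ = (pre ++ [fB v]) ++ rest.map fB := ih (pre ++ [fB v])
      _ = pre ++ (v :: rest).map fB := by simp

-- ===== VERDICT (by name: the statement is the Claim_ definition above) =====
theorem reduce_classes_spec : Claim_equal_reduce_classes := by
  intro y0 _
  show reduce_classes y0 = reduce_classes_alt y0
  have := loop_eq y0 []
  simpa [reduce_classes, reduce_classes_alt, fB, List.range_eq_range'] using this
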